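-- pv_equiv track=rewrite | github.com/jlesauce/TeleInfoMonitor | src/util/data_file_helpers.py | _create_teleinfo_frame_subset_arrays
-- ===== SOURCE A (Python) =====
-- def _create_teleinfo_frame_subset_arrays(iterable) -> list[list[str]]:
--     is_start_frame_detected = False
--     frames = []
--     frame = []
--     for line in iterable:
--         if line.startswith('ADCO'):
--             is_start_frame_detected = True
--             frame = [line]
--         elif is_start_frame_detected:
--             frame.append(line)
--             if line.startswith('MOTDETAT'):
--                 is_start_frame_detected = False
--                 frames.append(frame)
--     return frames
-- ===== SOURCE B (Python) =====
-- def _create_teleinfo_frame_subset_arrays(iterable) -> list[list[str]]: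
--     lines = list(iterable)
--     n = len(lines)
--     frames = []
--     i = 0
--     while i < n:
--         if not lines[i].startswith('ADCO'):
--             i += 1
--             continue
--         # frame candidate starts at i: scan to the next marker line
--         j = i + 1
--         while j < n and not lines[j].startswith('ADCO') and not lines[j].startswith('MOTDETAT'):
--             j += 1
--         if j < n and lines[j].startswith('MOTDETAT'):
--             frames.append(lines[i:j + 1])
--             i = j + 1
--         else:
--             i = j  # end of input, or a new ADCO restarting the frame
--     return frames
-- ===== Notes on version B (the rewrite author's own statement) =====
-- stated objective: alternative
-- what changed: Instead of A's incremental state machine that appends line by line into a growing frame buffer, B materializes the input and does a two-level index scan: find an ADCO line, scan forward to the next marker line, and emit the whole frame as a single slice lines[i:j+1].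
import Mathlib
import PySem

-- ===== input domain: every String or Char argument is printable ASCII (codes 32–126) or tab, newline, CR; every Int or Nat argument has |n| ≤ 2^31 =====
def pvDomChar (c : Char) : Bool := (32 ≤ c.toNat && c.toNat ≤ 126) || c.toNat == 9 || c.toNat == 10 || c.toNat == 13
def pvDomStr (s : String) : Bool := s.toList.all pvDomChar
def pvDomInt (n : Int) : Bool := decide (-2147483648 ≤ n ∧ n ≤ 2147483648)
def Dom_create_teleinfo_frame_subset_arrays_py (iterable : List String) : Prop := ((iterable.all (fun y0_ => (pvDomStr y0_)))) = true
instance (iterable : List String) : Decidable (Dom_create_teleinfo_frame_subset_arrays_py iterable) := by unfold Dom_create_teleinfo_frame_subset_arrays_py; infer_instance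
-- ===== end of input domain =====

-- B replaces A's line-by-line frame-accumulating state machine by a two-level index scan that emits each frame as one slice (objective: alternative decomposition, same cost).


-- line.startswith('ADCO') / line.startswith('MOTDETAT') (used by both Pythons)
def isA (l : String) : Bool := PySem.Str.startswith l "ADCO"
def isM (l : String) : Bool := PySem.Str.startswith l "MOTDETAT"

-- ===== PORT A =====
-- loop body of A: state = (is_start_frame_detected, frames, frame)
def stepA (st : Bool × List (List String) × List String) (line : String) :
    Bool × List (List String) × List String :=
  if isA line then (true, st.2.1, [line])
  else if st.1 then
    let frame := st.2.2 ++ [line]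
    if isM line then (false, st.2.1 ++ [frame], frame)
    else (true, st.2.1, frame)
  else st

def create_teleinfo_frame_subset_arrays_py (iterable : List String) : List (List String) :=
  (iterable.foldl stepA (false, [], [])).2.1

-- ===== PORT B =====
-- inner while loop of B: advance j until end of input or a marker line
def findStop (lines : List String) (n j : Nat) : Nat :=
  if h : j < n then
    if isA (lines.getD j "") ∨ isM (lines.getD j "") then j
    else findStop lines n (j + 1)
  else j
termination_by n - j

theorem findStop_ge (lines : List String) (n j : Nat) : j ≤ findStop lines n j := by
  rw [findStop]
  split
  · split
    · exact Nat.le_refl _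
    · have := findStop_ge lines n (j + 1); omega
  · exact Nat.le_refl _
termination_by n - j
decreasing_by omega

-- outer while loop of B
def outerB (lines : List String) (n i : Nat) : List (List String) :=
  if hi : i < n then
    if hA : ¬ isA (lines.getD i "") then outerB lines n (i + 1)
    else
      let j := findStop lines n (i + 1)
      if j < n ∧ isM (lines.getD j "") then
        PySem.List.slice lines (some (i : Int)) (some ((j : Int) + 1)) :: outerB lines n (j + 1)
      else outerB lines n j
  else []
termination_by n - i
decreasing_by
  · omega
  · have := findStop_ge lines n (i + 1); omega
  · have := findStop_ge lines n (i + 1); omega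

def create_teleinfo_frame_subset_arrays_py_alt (iterable : List String) : List (List String) :=
  outerB iterable iterable.length 0

-- ===== PRECONDITION & SPEC =====
def Spec_create_teleinfo_frame_subset_arrays_py (iterable : List String) (out : List (List String)) : Prop := out = create_teleinfo_frame_subset_arrays_py_alt iterable
instance (iterable : List String) (out : List (List String)) : Decidable (Spec_create_teleinfo_frame_subset_arrays_py iterable out) := by unfold Spec_create_teleinfo_frame_subset_arrays_py; infer_instance

-- ===== CLAIM (what is proved, stated in full; the proofs are below) =====
def Claim_equal_create_teleinfo_frame_subset_arrays_py : Prop := ∀ (iterable : List String), Dom_create_teleinfo_frame_subset_arrays_py iterable → Spec_create_teleinfo_frame_subset_arrays_py iterable (create_teleinfo_frame_subset_arrays_py iterable)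

-- ===== LEMMAS AND PROOFS =====

-- common functional specification: specF = scanning with no open frame, specS acc = open frame acc
mutual
def specF : List String → List (List String)
  | [] => []
  | l :: t => if isA l then specS [l] t else specF t
def specS (acc : List String) : List String → List (List String)
  | [] => []
  | l :: t =>
    if isA l then specS [l] t
    else if isM l then (acc ++ [l]) :: specF t
    else specS (acc ++ [l]) t
end

theorem not_isM_of_isA (l : String) (h : isA l = true) : isM l = false := by
  by_contra hM
  simp only [Bool.not_eq_false] at hM
  rw [isA, PySem.Str.startswith_eq, PySem.Chars.startswith_iff] at h
  rw [isM, PySem.Str.startswith_eq, PySem.Chars.startswith_iff] at hM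
  rcases List.prefix_or_prefix_of_prefix h hM with hp | hp
  · exact absurd hp (by decide)
  · exact absurd hp (by decide)

-- A's fold equals the functional specification
theorem foldA_spec (lines : List String) : ∀ (b : Bool) (F : List (List String)) (acc : List String),
    (lines.foldl stepA (b, F, acc)).2.1 = F ++ (if b then specS acc lines else specF lines) := by
  induction lines with
  | nil => intro b F acc; cases b <;> simp [specF, specS]
  | cons l t ih =>
    intro b F acc
    simp only [List.foldl_cons, stepA]
    by_cases hA : isA l = true
    · cases b <;> simp [hA, ih, specF, specS]
    · cases b with
      | false => simp [hA, ih, specF]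
      | true =>
        by_cases hM : isM l = true
        · simp [hA, hM, ih, specS]
        · simp [hA, hM, ih, specS]

-- B's branch after detecting ADCO at i (with j the inner-scan stop for start position j0)
def rhsQ (lines : List String) (n i j0 : Nat) : List (List String) :=
  if findStop lines n j0 < n ∧ isM (lines.getD (findStop lines n j0) "") then
    PySem.List.slice lines (some (i : Int)) (some ((findStop lines n j0 : Int) + 1)) ::
      outerB lines n (findStop lines n j0 + 1)
  else outerB lines n (findStop lines n j0)

theorem outerB_adco (lines : List String) (n i : Nat) (hi : i < n)
    (hA : isA (lines.getD i "") = true) :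
    outerB lines n i = rhsQ lines n i (i + 1) := by
  rw [outerB, dif_pos hi, dif_neg (not_not_intro hA)]
  rfl

theorem outerB_nil (lines : List String) (n i : Nat) (h : ¬ i < n) : outerB lines n i = [] := by
  rw [outerB, dif_neg h]

theorem findStop_stop (lines : List String) (n j : Nat) (hj : j < n)
    (h : isA (lines.getD j "") = true ∨ isM (lines.getD j "") = true) :
    findStop lines n j = j := by
  rw [findStop, dif_pos hj, if_pos h]

theorem findStop_skip (lines : List String) (n j : Nat) (hj : j < n)
    (hA : isA (lines.getD j "") = false) (hM : isM (lines.getD j "") = false) :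
    findStop lines n j = findStop lines n (j + 1) := by
  rw [findStop, dif_pos hj, if_neg ?_]
  rintro (h | h)
  · rw [hA] at h; exact Bool.noConfusion h
  · rw [hM] at h; exact Bool.noConfusion h

theorem findStop_out (lines : List String) (n j : Nat) (h : ¬ j < n) :
    findStop lines n j = j := by
  rw [findStop, dif_neg h]

theorem slice_eq_take (lines : List String) (i j : Nat) :
    PySem.List.slice lines (some (i : Int)) (some ((j : Int) + 1)) = (lines.drop i).take (j + 1 - i) := by
  have h : ((j : Int) + 1) = ((j + 1 : Nat) : Int) := by push_cast; ring
  rw [h, PySem.List.slice_natCast]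

theorem take_push (lines : List String) (i j : Nat) (hij : i ≤ j) (hj : j < lines.length) :
    (lines.drop i).take (j - i) ++ [lines.getD j ""] = (lines.drop i).take (j + 1 - i) := by
  have h1 : j + 1 - i = (j - i) + 1 := by omega
  have h2 : (lines.drop i)[j - i]? = some (lines.getD j "") := by
    rw [List.getElem?_drop]
    have : i + (j - i) = j := by omega
    rw [this, List.getElem?_eq_getElem hj, List.getD_eq_getElem _ _ hj]
  rw [h1, List.take_add_one, h2]
  rfl

theorem drop_cons (lines : List String) (j : Nat) (hj : j < lines.length) :
    lines.drop j = lines.getD j "" :: lines.drop (j + 1) := by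
  rw [List.getD_eq_getElem _ _ hj]
  exact List.drop_eq_getElem_cons hj

theorem take_one_at (lines : List String) (j : Nat) (hj : j < lines.length) :
    [lines.getD j ""] = (lines.drop j).take (j + 1 - j) := by
  rw [show j + 1 - j = 1 by omega, drop_cons lines j hj]
  rfl

-- the main correspondence between B's index loops and the functional specification
theorem mainPQ (lines : List String) : ∀ d : Nat,
    (∀ i, lines.length - i ≤ d → outerB lines lines.length i = specF (lines.drop i)) ∧
    (∀ i j, i < j → lines.length - j ≤ d →
      specS ((lines.drop i).take (j - i)) (lines.drop j) = rhsQ lines lines.length i j) := by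
  intro d
  induction d with
  | zero =>
    constructor
    · intro i hi
      rw [outerB_nil lines _ i (by omega),
        List.drop_eq_nil_of_le (show lines.length ≤ i by omega), specF]
    · intro i j hij hj
      rw [List.drop_eq_nil_of_le (show lines.length ≤ j by omega)]
      unfold rhsQ
      rw [findStop_out lines _ j (by omega)]
      rw [if_neg (by omega), outerB_nil lines _ j (by omega), specS]
  | succ d ih =>
    constructor
    · intro i hi
      by_cases hin : i < lines.length
      · rw [drop_cons lines i hin]
        by_cases hA : isA (lines.getD i "") = true
        · rw [outerB_adco lines _ i hin hA]
          rw [show specF (lines.getD i "" :: lines.drop (i + 1)) =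
              specS [lines.getD i ""] (lines.drop (i + 1)) by rw [specF, if_pos hA]]
          rw [take_one_at lines i hin]
          exact (ih.2 i (i + 1) (by omega) (by omega)).symm
        · rw [outerB, dif_pos hin, dif_pos hA]
          rw [show specF (lines.getD i "" :: lines.drop (i + 1)) = specF (lines.drop (i + 1)) by
            rw [specF, if_neg hA]]
          exact ih.1 (i + 1) (by omega)
      · rw [outerB_nil lines _ i hin,
          List.drop_eq_nil_of_le (show lines.length ≤ i by omega), specF]
    · intro i j hij hj
      by_cases hjn : j < lines.length
      · rw [drop_cons lines j hjn]
        by_cases hA : isA (lines.getD j "") = true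
        · -- inner scan stops on ADCO: frame restarts at j
          have hM := not_isM_of_isA _ hA
          rw [show specS ((lines.drop i).take (j - i))
              (lines.getD j "" :: lines.drop (j + 1)) =
              specS [lines.getD j ""] (lines.drop (j + 1)) by rw [specS, if_pos hA]]
          rw [take_one_at lines j hjn]
          rw [ih.2 j (j + 1) (by omega) (by omega)]
          conv_rhs => rw [rhsQ.eq_def]
          rw [findStop_stop lines _ j hjn (Or.inl hA)]
          rw [if_neg (by rintro ⟨-, h⟩; rw [hM] at h; exact Bool.noConfusion h)]
          rw [outerB_adco lines _ j hjn hA]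
        · by_cases hM : isM (lines.getD j "") = true
          · -- inner scan stops on MOTDETAT: emit the frame
            rw [show specS ((lines.drop i).take (j - i))
                (lines.getD j "" :: lines.drop (j + 1)) =
                ((lines.drop i).take (j - i) ++ [lines.getD j ""]) :: specF (lines.drop (j + 1)) by
              rw [specS, if_neg (by rw [Bool.not_eq_true] at hA ⊢; exact hA), if_pos hM]]
            unfold rhsQ
            rw [findStop_stop lines _ j hjn (Or.inr hM)]
            rw [if_pos ⟨hjn, hM⟩]
            rw [slice_eq_take, ← take_push lines i j (by omega) hjn]
            rw [ih.1 (j + 1) (by omega)]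
          · -- plain line: extend the frame
            rw [show specS ((lines.drop i).take (j - i))
                (lines.getD j "" :: lines.drop (j + 1)) =
                specS ((lines.drop i).take (j - i) ++ [lines.getD j ""]) (lines.drop (j + 1)) by
              rw [specS, if_neg (by rw [Bool.not_eq_true] at hA ⊢; exact hA),
                if_neg (by rw [Bool.not_eq_true] at hM ⊢; exact hM)]]
            rw [take_push lines i j (by omega) hjn]
            rw [show (lines.drop i).take (j + 1 - i) = (lines.drop i).take ((j + 1) - i) from rfl]
            rw [ih.2 i (j + 1) (by omega) (by omega)]
            unfold rhsQ
            rw [findStop_skip lines _ j hjn (by rwa [Bool.not_eq_true] at hA)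
              (by rwa [Bool.not_eq_true] at hM)]
      · rw [List.drop_eq_nil_of_le (show lines.length ≤ j by omega)]
        unfold rhsQ
        rw [findStop_out lines _ j hjn]
        rw [if_neg (fun h => hjn h.1), outerB_nil lines _ j hjn, specS]

-- ===== VERDICT (by name: the statement is the Claim_ definition above) =====
theorem create_teleinfo_frame_subset_arrays_py_spec : Claim_equal_create_teleinfo_frame_subset_arrays_py := by
  intro iterable _
  unfold Spec_create_teleinfo_frame_subset_arrays_py
  unfold create_teleinfo_frame_subset_arrays_py create_teleinfo_frame_subset_arrays_py_alt
  rw [foldA_spec iterable false [] []]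
  rw [(mainPQ iterable iterable.length).1 0 (by omega)]
  simp
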